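-- pv_equiv track=rewrite | github.com/alaebaha20k-maker/story-video-appp | story-video-generator/src/ai/advanced_script_generator.py | _merge_chunks_seamlessly
-- ===== SOURCE A (Python) =====
-- from typing import Dict, List, Optional
--
-- def _merge_chunks_seamlessly(chunks: List[str]) -> str:
--     """Merge script chunks with seamless transitions"""
--     if len(chunks) == 1:
--         return chunks[0]
--
--     merged = chunks[0]
--
--     for i in range(1, len(chunks)):
--         # Find overlap and merge smoothly
--         chunk = chunks[i]
--
--         # Remove potential duplicate sentences at chunk boundaries
--         merged_sentences = merged.split('.')
--         chunk_sentences = chunk.split('.')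
--
--         # Check for overlap in last few sentences
--         overlap_found = False
--         for j in range(min(3, len(merged_sentences), len(chunk_sentences))):
--             if merged_sentences[-(j+1)].strip() == chunk_sentences[j].strip():
--                 # Remove overlap
--                 chunk = '.'.join(chunk_sentences[j+1:])
--                 overlap_found = True
--                 break
--
--         # Add transition if needed
--         if not merged.endswith('.') and not merged.endswith('!') and not merged.endswith('?'):
--             merged += '.'
--
--         merged += ' ' + chunk
--
--     return merged.strip()
-- ===== SOURCE B (Python) =====
-- def _merge_chunks_seamlessly(chunks):
--     """Merge script chunks with seamless transitions (single pass, rolling tail)"""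
--     if len(chunks) == 1:
--         return chunks[0]
--
--     parts = [chunks[0]]
--     # rolling state: last <=3 '.'-separated sentences of the merged text, and its last char
--     tail = chunks[0].split('.')[-3:]
--     last = chunks[0][-1:]
--
--     for chunk in chunks[1:]:
--         cs = chunk.split('.')
--
--         for j in range(min(len(tail), len(cs))):
--             if tail[-(j+1)].strip() == cs[j].strip():
--                 chunk = '.'.join(cs[j+1:])
--                 break
--
--         sep = '' if last in ('.', '!', '?') else '.'
--         add = sep + ' ' + chunk
--         parts.append(add)
--
--         u = add.split('.')
--         tail = (tail[:-1] + [tail[-1] + u[0]] + u[1:])[-3:]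
--         last = add[-1:]
--
--     return ''.join(parts).strip()
-- ===== Notes on version B (the rewrite author's own statement) =====
-- stated objective: faster
-- what changed: Instead of re-splitting the entire merged string by '.' on every iteration (quadratic in total text size), B streams the pieces into a parts list joined once at the end and maintains a rolling state of the last <=3 '.'-sentences plus the last character, making each iteration cost proportional to the current chunk only.
-- outside the precondition, e.g. on _merge_chunks_seamlessly([]): A raises IndexError, B raises IndexError
import Mathlib
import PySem

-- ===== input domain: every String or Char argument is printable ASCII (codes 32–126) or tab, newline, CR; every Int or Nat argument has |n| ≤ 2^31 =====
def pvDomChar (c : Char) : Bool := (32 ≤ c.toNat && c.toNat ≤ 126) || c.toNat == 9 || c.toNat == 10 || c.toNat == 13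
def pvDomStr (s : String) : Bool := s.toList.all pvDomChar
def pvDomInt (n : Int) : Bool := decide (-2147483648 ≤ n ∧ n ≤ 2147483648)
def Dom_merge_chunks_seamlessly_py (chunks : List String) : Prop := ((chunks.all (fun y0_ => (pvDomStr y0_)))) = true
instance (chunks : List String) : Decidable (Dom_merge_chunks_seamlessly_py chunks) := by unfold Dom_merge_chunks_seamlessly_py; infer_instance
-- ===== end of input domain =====

-- B replaces A's re-splitting of the whole merged string at every iteration by a single pass that
-- keeps a rolling tail of the last ≤3 '.'-sentences plus the last character, joining the parts once at the end.

-- ===== PORT A =====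
-- inner 'for j in range(min(3,…)): … break' loop: first j whose boundary sentences match
def mergeOverlapIdxA (ms cs : List (List Char)) : Option Nat :=
  (List.range (min 3 (min ms.length cs.length))).find?
    (fun (j : Nat) => PySem.Chars.strip (PySem.List.pyGetD ms (-((j : Int) + 1)) []) ==
              PySem.Chars.strip (PySem.List.pyGetD cs ((j : Int)) []))
-- "chunk = '.'.join(chunk_sentences[j+1:])" when an overlap was found
def cutChunkA (chunk : List Char) (cs : List (List Char)) : Option Nat → List Char
  | some j => PySem.Chars.join ['.'] (PySem.List.slice cs (some ((j : Int) + 1)) none)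
  | none => chunk
-- "if not merged.endswith('.') and …: merged += '.'"
def addDotA (merged : List Char) : List Char :=
  if !(PySem.Chars.endswith merged ['.']) && !(PySem.Chars.endswith merged ['!'])
      && !(PySem.Chars.endswith merged ['?'])
  then merged ++ ['.'] else merged
-- one iteration of A's main loop
def mergeStepA (merged chunk : List Char) : List Char :=
  let ms := PySem.Chars.splitOn merged ['.']
  let cs := PySem.Chars.splitOn chunk ['.']
  addDotA merged ++ [' '] ++ cutChunkA chunk cs (mergeOverlapIdxA ms cs)

def merge_chunks_seamlessly_py (chunks : List String) : String :=
  if chunks.length == 1 then PySem.List.pyGetD chunks 0 ""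
  else
    let cl := chunks.map String.toList
    let merged0 := PySem.List.pyGetD cl 0 []
    let mergedF := List.foldl (fun m i => mergeStepA m (PySem.List.pyGetD cl i []))
        merged0 (PySem.List.pyRange 1 (PySem.List.len cl))
    String.ofList (PySem.Chars.strip mergedF)

-- ===== PORT B =====
-- inner overlap loop over the rolling tail
def overlapIdxB (tl cs : List (List Char)) : Option Nat :=
  (List.range (min tl.length cs.length)).find?
    (fun (j : Nat) => PySem.Chars.strip (PySem.List.pyGetD tl (-((j : Int) + 1)) []) ==
              PySem.Chars.strip (PySem.List.pyGetD cs ((j : Int)) []))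
def cutChunkB (chunk : List Char) (cs : List (List Char)) : Option Nat → List Char
  | some j => PySem.Chars.join ['.'] (PySem.List.slice cs (some ((j : Int) + 1)) none)
  | none => chunk
-- "sep = '' if last in ('.','!','?') else '.'"
def sepB (last : List Char) : List Char :=
  if last == ['.'] || last == ['!'] || last == ['?'] then [] else ['.']
-- "tail = (tail[:-1] + [tail[-1] + u[0]] + u[1:])[-3:]"
def newTailB (tl u : List (List Char)) : List (List Char) :=
  PySem.List.slice
    (PySem.List.slice tl none (some (-1)) ++
      [PySem.List.pyGetD tl (-1) [] ++ PySem.List.pyGetD u 0 []] ++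
      PySem.List.slice u (some 1) none)
    (some (-3)) none
-- one iteration of B's loop over state (parts, tail, last)
def mergeStepB (st : List (List Char) × List (List Char) × List Char) (chunk : List Char) :
    List (List Char) × List (List Char) × List Char :=
  let cs := PySem.Chars.splitOn chunk ['.']
  let add := sepB st.2.2 ++ [' '] ++ cutChunkB chunk cs (overlapIdxB st.2.1 cs)
  (st.1 ++ [add], newTailB st.2.1 (PySem.Chars.splitOn add ['.']),
   PySem.List.slice add (some (-1)) none)

def merge_chunks_seamlessly_py_alt (chunks : List String) : String :=
  if chunks.length == 1 then PySem.List.pyGetD chunks 0 ""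
  else
    let cl := chunks.map String.toList
    let c0 := PySem.List.pyGetD cl 0 []
    let st := List.foldl mergeStepB
      ([c0], PySem.List.slice (PySem.Chars.splitOn c0 ['.']) (some (-3)) none,
        PySem.List.slice c0 (some (-1)) none)
      (PySem.List.slice cl (some 1) none)
    String.ofList (PySem.Chars.strip (PySem.Chars.join [] st.1))

-- ===== PRECONDITION & SPEC =====
-- Pre_ excludes only the empty list, on which Python A raises IndexError (chunks[0]); B raises there too.
def Pre_merge_chunks_seamlessly_py (chunks : List String) : Prop := chunks ≠ []
instance (chunks : List String) : Decidable (Pre_merge_chunks_seamlessly_py chunks) := by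
  unfold Pre_merge_chunks_seamlessly_py; infer_instance

def pvWitness_merge_chunks_seamlessly_py : List String :=
  ["Intro. Same line.", " Same line. More text!", "Tail"]

def Spec_merge_chunks_seamlessly_py (chunks : List String) (out : String) : Prop := out = merge_chunks_seamlessly_py_alt chunks
instance (chunks : List String) (out : String) : Decidable (Spec_merge_chunks_seamlessly_py chunks out) := by unfold Spec_merge_chunks_seamlessly_py; infer_instance

-- ===== CLAIM (what is proved, stated in full; the proofs are below) =====
def Claim_equal_merge_chunks_seamlessly_py : Prop := ∀ (chunks : List String), Dom_merge_chunks_seamlessly_py chunks → Pre_merge_chunks_seamlessly_py chunks → Spec_merge_chunks_seamlessly_py chunks (merge_chunks_seamlessly_py chunks)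

-- ===== LEMMAS AND PROOFS =====

-- proof-side model of s.split('.'), structurally recursive
def splitDot : List Char → List (List Char)
  | [] => [[]]
  | c :: r => if c = '.' then [] :: splitDot r else (splitDot r).modifyHead (c :: ·)

-- proof-side model of l[-k:]
def pvTakeR {α : Type} (k : Nat) (l : List α) : List α := l.drop (l.length - k)

-- the invariant tying A's merged string to B's rolling state
def pvInv (merged : List Char) (st : List (List Char) × List (List Char) × List Char) : Prop :=
  st.1.flatten = merged ∧
  st.2.1 = pvTakeR 3 (splitDot merged) ∧
  st.2.2 = merged.drop (merged.length - 1)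

theorem splitDot_ne_nil (s : List Char) : splitDot s ≠ [] := by
  induction s with
  | nil => simp [splitDot]
  | cons c r ih =>
    simp only [splitDot]
    split_ifs
    · simp
    · cases h : splitDot r with
      | nil => exact absurd h ih
      | cons x xs => simp

theorem splitOn_go_eq (fuel : Nat) (l cur : List Char) (acc : List (List Char))
    (h : l.length ≤ fuel) :
    PySem.Chars.splitOn.go ['.'] fuel l cur acc =
      acc.reverse ++ (splitDot l).modifyHead (cur.reverse ++ ·) := by
  induction fuel generalizing l cur acc with
  | zero =>
    have hl : l = [] := by rw [← List.length_eq_zero_iff]; omega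
    subst hl
    rw [PySem.Chars.splitOn.go]
    simp [splitDot]
  | succ f ih =>
    cases l with
    | nil =>
      rw [PySem.Chars.splitOn.go]
      simp [splitDot]
      omega
    | cons c r =>
      rw [PySem.Chars.splitOn.go]
      by_cases hc : c = '.'
      · subst hc
        have hp : ['.'].isPrefixOf ('.' :: r) = true := by simp [List.isPrefixOf]
        rw [if_pos hp]
        have hd : List.drop ['.'].length ('.' :: r) = r := rfl
        rw [hd, ih r [] (cur.reverse :: acc) (by simp at h; omega)]
        simp only [splitDot, List.reverse_cons]
        cases hsr : splitDot r <;> simp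
      · have hp : ¬ (['.'].isPrefixOf (c :: r) = true) := by
          simp [List.isPrefixOf]
          exact fun h' => hc h'.symm
        rw [if_neg hp]
        rw [ih r (c :: cur) acc (by simp at h; omega)]
        simp only [splitDot, if_neg hc, List.reverse_cons]
        cases hsr : splitDot r with
        | nil => exact absurd hsr (splitDot_ne_nil r)
        | cons x xs => simp

theorem splitOn_dot (s : List Char) : PySem.Chars.splitOn s ['.'] = splitDot s := by
  rw [PySem.Chars.splitOn, splitOn_go_eq _ _ _ _ (by omega)]
  cases h : splitDot s with
  | nil => exact absurd h (splitDot_ne_nil s)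
  | cons x xs => simp

theorem join_nil_flatten (ps : List (List Char)) : PySem.Chars.join [] ps = ps.flatten := by
  rw [PySem.Chars.join]
  induction ps with
  | nil => simp [List.intercalate]
  | cons x xs ih =>
    cases xs with
    | nil => simp [List.intercalate]
    | cons y ys =>
      simp [List.intercalate, List.intersperse] at *
      simpa using ih

theorem endswith_single (m : List Char) (c : Char) :
    PySem.Chars.endswith m [c] = (m.drop (m.length - 1) == [c]) := by
  induction m using List.reverseRecOn with
  | nil => simp [PySem.Chars.endswith]
  | append_singleton xs x ih =>
    simp [PySem.Chars.endswith, List.isSuffixOf, List.isPrefixOf, Bool.beq_comm]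

theorem splitDot_append (a b : List Char) :
    splitDot (a ++ b) =
      (splitDot a).dropLast ++
        ((splitDot a).getLastD [] ++ (splitDot b).headD []) :: (splitDot b).tail := by
  induction a with
  | nil =>
    cases h : splitDot b with
    | nil => exact absurd h (splitDot_ne_nil b)
    | cons x xs => simp [splitDot]
                   exact h
  | cons c a ih =>
    by_cases hc : c = '.'
    · subst hc
      simp only [List.cons_append, splitDot, ih]
      cases h : splitDot a with
      | nil => exact absurd h (splitDot_ne_nil a)
      | cons x xs => cases xs <;> simp
    · simp only [List.cons_append, splitDot, if_neg hc, ih]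
      cases h : splitDot a with
      | nil => exact absurd h (splitDot_ne_nil a)
      | cons x xs =>
        cases xs with
        | nil => simp
        | cons y ys => simp

theorem getLastD_append' {α : Type} (x y : List α) (h : y ≠ []) (d : α) :
    (x ++ y).getLastD d = y.getLastD d := by
  rw [List.getLastD_eq_getLast?, List.getLastD_eq_getLast?, List.getLast?_append_of_ne_nil x h]

theorem pvTakeR_append_of_le {α : Type} (k : Nat) (x y : List α) (h : k ≤ y.length) :
    pvTakeR k (x ++ y) = pvTakeR k y := by
  simp only [pvTakeR, List.length_append]
  rw [show x.length + y.length - k = x.length + (y.length - k) by omega, List.drop_append,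
      List.drop_eq_nil_of_le (by omega), List.nil_append]
  congr 1
  omega

theorem pvTakeR_boundary {α : Type} (gd : α) (l : List α) (ut : List α) (f : α → α) :
    pvTakeR 3 ((pvTakeR 3 l).dropLast ++ (f ((pvTakeR 3 l).getLastD gd)) :: ut) =
      pvTakeR 3 (l.dropLast ++ (f (l.getLastD gd)) :: ut) := by
  by_cases h3 : l.length ≤ 3
  · rw [show pvTakeR 3 l = l by simp [pvTakeR, Nat.sub_eq_zero_of_le h3]]
  · have hx : l = l.take (l.length - 3) ++ pvTakeR 3 l := by simp [pvTakeR]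
    have hlen : (pvTakeR 3 l).length = 3 := by simp [pvTakeR]; omega
    have htne : pvTakeR 3 l ≠ [] := by intro hh; rw [hh] at hlen; simp at hlen
    conv_rhs => rw [hx]
    rw [List.dropLast_append_of_ne_nil htne, getLastD_append' _ _ htne, List.append_assoc]
    rw [pvTakeR_append_of_le 3 (l.take (l.length - 3)) _ (by simp [hlen]; omega)]

theorem pvTakeR_pyGetD_neg (l : List (List Char)) (j : Nat)
    (h : j + 1 ≤ (pvTakeR 3 l).length) :
    PySem.List.pyGetD (pvTakeR 3 l) (-((j : Int) + 1)) [] =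
      PySem.List.pyGetD l (-((j : Int) + 1)) [] := by
  have hlen : (pvTakeR 3 l).length = l.length - (l.length - 3) := by simp [pvTakeR]
  have e1 : -((j : Int) + 1) = -(((j+1 : Nat) : Int)) := by push_cast; ring
  rw [e1, PySem.List.pyGetD_neg_natCast _ _ _ (by omega) (by omega),
      PySem.List.pyGetD_neg_natCast _ _ _ (by omega) (by omega)]
  show (l.drop (l.length - 3))[(pvTakeR 3 l).length - (j+1)]'_ = _
  rw [List.getElem_drop]
  congr 1
  omega

theorem find?_congr_mem {α : Type} (l : List α) (p q : α → Bool) (h : ∀ a ∈ l, p a = q a) :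
    l.find? p = l.find? q := by
  induction l with
  | nil => rfl
  | cons a l ih =>
    simp only [List.find?_cons]
    rw [h a (by simp)]
    split
    · rfl
    · exact ih (fun a ha => h a (by simp [ha]))

theorem pvTakeR_length_3 (l : List (List Char)) : (pvTakeR 3 l).length = min 3 l.length := by
  simp [pvTakeR]; omega

theorem overlapIdx_eq (ms cs : List (List Char)) :
    overlapIdxB (pvTakeR 3 ms) cs = mergeOverlapIdxA ms cs := by
  rw [overlapIdxB, mergeOverlapIdxA,
      show min (pvTakeR 3 ms).length cs.length = min 3 (min ms.length cs.length) by
        rw [pvTakeR_length_3]; omega]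
  apply find?_congr_mem
  intro j hj
  rw [List.mem_range] at hj
  rw [pvTakeR_pyGetD_neg _ _ (by rw [pvTakeR_length_3]; omega)]

theorem cutChunk_eq (chunk : List Char) (cs : List (List Char)) (j? : Option Nat) :
    cutChunkB chunk cs j? = cutChunkA chunk cs j? := by cases j? <;> rfl

theorem addDot_eq (merged : List Char) :
    addDotA merged = merged ++ sepB (merged.drop (merged.length - 1)) := by
  rw [addDotA, sepB]
  simp only [endswith_single]
  cases hd : (merged.drop (merged.length - 1) == ['.']) <;>
    cases he : (merged.drop (merged.length - 1) == ['!']) <;>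
    cases hf : (merged.drop (merged.length - 1) == ['?']) <;>
    simp_all

theorem newTail_eq (m add : List Char) :
    newTailB (pvTakeR 3 (splitDot m)) (PySem.Chars.splitOn add ['.']) =
      pvTakeR 3 (splitDot (m ++ add)) := by
  have htne : pvTakeR 3 (splitDot m) ≠ [] := by
    intro hh
    have h1 := pvTakeR_length_3 (splitDot m)
    have h2 := List.length_pos_of_ne_nil (splitDot_ne_nil m)
    rw [hh] at h1
    simp at h1
    omega
  obtain ⟨u0, ut, hu⟩ : ∃ u0 ut, splitDot add = u0 :: ut := by
    cases h : splitDot add with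
    | nil => exact absurd h (splitDot_ne_nil _)
    | cons a b => exact ⟨a, b, rfl⟩
  rw [newTailB, splitOn_dot, hu, PySem.List.slice_to_neg_one,
      PySem.List.pyGetD_neg_one _ _ htne, PySem.List.slice_from_one, PySem.List.slice_some_none]
  simp only [List.tail_cons, PySem.List.pyGetD_zero_cons]
  rw [show PySem.List.clampIdx ((pvTakeR 3 (splitDot m)).dropLast ++
        [(pvTakeR 3 (splitDot m)).getLast htne ++ u0] ++ ut).length (-3)
      = ((pvTakeR 3 (splitDot m)).dropLast ++
        [(pvTakeR 3 (splitDot m)).getLast htne ++ u0] ++ ut).length - 3 by simp [pysem]]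
  rw [show ∀ (x : List (List Char)), x.drop (x.length - 3) = pvTakeR 3 x from fun _ => rfl]
  rw [List.append_assoc, List.singleton_append,
      show (pvTakeR 3 (splitDot m)).getLast htne = (pvTakeR 3 (splitDot m)).getLastD [] by
        rw [List.getLastD_eq_getLast?, List.getLast?_eq_some_getLast htne]; rfl]
  rw [pvTakeR_boundary [] (splitDot m) ut (· ++ u0), splitDot_append, hu]
  simp

theorem step_inv (merged chunk : List Char) (st : List (List Char) × List (List Char) × List Char)
    (h : pvInv merged st) : pvInv (mergeStepA merged chunk) (mergeStepB st chunk) := by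
  obtain ⟨parts, tl, last⟩ := st
  obtain ⟨h1, h2, h3⟩ := h
  simp only at h1 h2 h3
  have hstepA : mergeStepA merged chunk =
      merged ++ (sepB last ++ [' '] ++
        cutChunkB chunk (PySem.Chars.splitOn chunk ['.'])
          (overlapIdxB tl (PySem.Chars.splitOn chunk ['.']))) := by
    rw [mergeStepA]
    rw [h2, splitOn_dot merged] at *
    rw [overlapIdx_eq, cutChunk_eq, addDot_eq, ← h3]
    simp [List.append_assoc]
  set add := sepB last ++ [' '] ++
        cutChunkB chunk (PySem.Chars.splitOn chunk ['.'])
          (overlapIdxB tl (PySem.Chars.splitOn chunk ['.'])) with hadd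
  have hB : mergeStepB (parts, tl, last) chunk =
      (parts ++ [add], newTailB tl (PySem.Chars.splitOn add ['.']),
        PySem.List.slice add (some (-1)) none) := rfl
  rw [hstepA, hB, pvInv]
  refine ⟨by simp [h1], ?_, ?_⟩
  · show newTailB tl _ = _
    rw [h2, newTail_eq]
  · show PySem.List.slice add (some (-1)) none = _
    rw [PySem.List.slice_some_none]
    have hane : add ≠ [] := by rw [hadd]; simp
    rw [show PySem.List.clampIdx add.length (-1) = add.length - 1 by simp [pysem]]
    have := pvTakeR_append_of_le 1 merged add (List.length_pos_of_ne_nil hane)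
    simpa [pvTakeR, List.length_append] using this.symm

theorem fold_inv (rs : List (List Char)) (merged : List Char)
    (st : List (List Char) × List (List Char) × List Char) (h : pvInv merged st) :
    pvInv (List.foldl mergeStepA merged rs) (List.foldl mergeStepB st rs) := by
  induction rs generalizing merged st with
  | nil => exact h
  | cons r rs ih => exact ih _ _ (step_inv _ _ _ h)

-- ===== VERDICT (by name: the statement is the Claim_ definition above) =====
theorem merge_chunks_seamlessly_py_spec : Claim_equal_merge_chunks_seamlessly_py := by
  intro chunks _hdom hpre
  unfold Spec_merge_chunks_seamlessly_py
  cases chunks with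
  | nil => exact absurd rfl hpre
  | cons c rest =>
    rw [merge_chunks_seamlessly_py, merge_chunks_seamlessly_py_alt]
    by_cases h1 : ((c :: rest).length == 1) = true
    · rw [if_pos h1, if_pos h1]
    · rw [if_neg h1, if_neg h1]
      simp only [List.map_cons, PySem.List.pyGetD_zero_cons, PySem.List.slice_from_one,
        List.tail_cons]
      rw [PySem.List.foldl_pyRange_pyGetD _ [] mergeStepA _ (by norm_num : (0:Int) ≤ 1)]
      have hdrop : List.drop (Int.toNat 1) (c.toList :: rest.map String.toList)
          = rest.map String.toList := rfl
      rw [hdrop]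
      have inv0 : pvInv c.toList
          ([c.toList], PySem.List.slice (PySem.Chars.splitOn c.toList ['.']) (some (-3)) none,
            PySem.List.slice c.toList (some (-1)) none) := by
        unfold pvInv
        refine ⟨by simp, ?_, ?_⟩
        · rw [splitOn_dot, PySem.List.slice_some_none]
          rw [show PySem.List.clampIdx (splitDot c.toList).length (-3)
              = (splitDot c.toList).length - 3 by simp [pysem]]
          rfl
        · rw [PySem.List.slice_some_none]
          simp [pysem]
      have hinv := fold_inv (rest.map String.toList) _ _ inv0
      rw [join_nil_flatten, hinv.1]
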